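-- pv_equiv track=rewrite | github.com/DanyloRudavets/prg-basics | 13-Test3/p7.py | f
-- ===== SOURCE A (Python) =====
-- def f(n):
--     l=[]
--     for i in  range(len(n[0])):
--         c=0
--         for j in range(len(n)):
--             c+=n[j][i]
--         l.append(c)
--     for i in l:
--         if l.count(i)>=2:
--             k=True
--             break
--         else:
--             k=False
--     return k
-- ===== SOURCE B (Python) =====
-- def f(n):
--     l = n[0][:]
--     for row in n[1:]:
--         l = [a + b for a, b in zip(l, row)]
--     ls = sorted(l)
--     return any(x == y for x, y in zip(ls, ls[1:]))
-- ===== Notes on version B (the rewrite author's own statement) =====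
-- stated objective: alternative
-- what changed: B replaces A's column-indexed double loop by a row-wise fold that zip-adds each row into a running vector, and replaces A's per-element l.count duplicate scan by sorting the sums and testing adjacent pairs for equality.
import Mathlib
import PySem

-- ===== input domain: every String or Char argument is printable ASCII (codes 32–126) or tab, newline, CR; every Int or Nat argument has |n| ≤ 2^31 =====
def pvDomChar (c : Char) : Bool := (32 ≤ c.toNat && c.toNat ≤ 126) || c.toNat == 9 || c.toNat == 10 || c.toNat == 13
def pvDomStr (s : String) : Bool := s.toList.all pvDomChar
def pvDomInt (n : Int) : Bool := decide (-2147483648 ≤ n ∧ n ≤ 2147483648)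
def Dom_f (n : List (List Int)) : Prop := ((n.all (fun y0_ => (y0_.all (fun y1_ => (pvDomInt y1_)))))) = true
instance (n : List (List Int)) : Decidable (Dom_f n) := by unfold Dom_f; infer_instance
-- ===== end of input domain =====

-- B folds the rows into a running column-sum vector via zip-add and detects a duplicate
-- by sorting the sums and comparing adjacent pairs, instead of A's index loops and
-- per-element l.count scan (alternative algorithm); equivalence is proved exactly
-- where the Python A returns (Pre_f).


-- ===== PORT A =====
-- the second loop of A: 'for i in l: if l.count(i)>=2: k=True; break; else: k=False'
-- ([] leaves k unbound in Python — excluded by Pre_f; the port returns false there)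
def fScan (full : List Int) : List Int → Bool
  | [] => false
  | i :: rest => if 2 ≤ PySem.List.count full i then true else fScan full rest

def f (n : List (List Int)) : Bool :=
  let row0 := PySem.List.pyGetD n 0 []      -- n[0]; IndexError on n = [] is excluded by Pre_f
  let l := (PySem.List.pyRange 0 (row0.length : Int) 1).foldl
      (fun l i =>
        l ++ [(PySem.List.pyRange 0 (n.length : Int) 1).foldl
          (fun c j => c + PySem.List.pyGetD (PySem.List.pyGetD n j []) i 0) 0]) []
  fScan l l

-- ===== PORT B =====
def f_alt (n : List (List Int)) : Bool :=
  let l0 := PySem.List.slice (PySem.List.pyGetD n 0 []) none none   -- n[0][:]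
  let l := (n.drop 1).foldl (fun l row => (l.zip row).map (fun p => p.1 + p.2)) l0
  let ls := PySem.List.sorted l (fun x => x) false
  (ls.zip (ls.drop 1)).any (fun p => p.1 == p.2)

-- ===== PRECONDITION & SPEC =====
-- Pre_f is exactly where Python A returns: n nonempty (else IndexError on n[0]),
-- first row nonempty (else k is unbound: UnboundLocalError), and every row at least
-- as long as the first (else IndexError in the inner loop).
def Pre_f (n : List (List Int)) : Prop :=
  n ≠ [] ∧ 1 ≤ (n.headD []).length ∧ ∀ row ∈ n, (n.headD []).length ≤ row.length
instance (n : List (List Int)) : Decidable (Pre_f n) := by unfold Pre_f; infer_instance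
def pvWitness_f : List (List Int) := [[1, 2], [2, 1]]

def Spec_f (n : List (List Int)) (out : Bool) : Prop := out = f_alt n
instance (n : List (List Int)) (out : Bool) : Decidable (Spec_f n out) := by unfold Spec_f; infer_instance

-- ===== CLAIM (what is proved, stated in full; the proofs are below) =====
def Claim_equal_f : Prop := ∀ (n : List (List Int)), Dom_f n → Pre_f n → Spec_f n (f n)

-- ===== LEMMAS AND PROOFS =====

-- A's break-on-duplicate scan is List.any of 'count ≥ 2'
theorem fScan_eq_any (full : List Int) (l : List Int) :
    fScan full l = l.any (fun i => decide (2 ≤ PySem.List.count full i)) := by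
  induction l with
  | nil => rfl
  | cons i rest ih =>
      rw [List.any_cons, ← ih]
      show (if 2 ≤ PySem.List.count full i then true else fScan full rest) = _
      split_ifs with h
      · simp only [PySem.List.count_eq] at h
        simp [h]
      · simp only [PySem.List.count_eq] at h
        simp [h]

-- A's scan over the whole list detects exactly 'not Nodup'
theorem fScan_eq_not_nodup (l : List Int) : fScan l l = !decide l.Nodup := by
  rw [fScan_eq_any]
  by_cases h : l.Nodup
  · simp only [h, decide_true, Bool.not_true, List.any_eq_false]
    intro x hx
    simp only [PySem.List.count_eq, decide_eq_true_eq, not_le]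
    rw [List.count_eq_one_of_mem h hx]; omega
  · simp only [h, decide_false, Bool.not_false, List.any_eq_true]
    obtain ⟨x, hx⟩ := List.exists_duplicate_iff_not_nodup.mpr h
    exact ⟨x, hx.mem, by simp [PySem.List.count_eq, List.duplicate_iff_two_le_count.mp hx]⟩

-- B's adjacent-equality scan on a ≤-sorted list detects exactly 'not Nodup'
theorem adj_eq_not_nodup (ls : List Int) (h : ls.Pairwise (· ≤ ·)) :
    ((ls.zip (ls.drop 1)).any (fun p => p.1 == p.2)) = !decide ls.Nodup := by
  induction ls with
  | nil => rfl
  | cons a t ih =>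
      cases t with
      | nil => rfl
      | cons b t' =>
          have hab : a ≤ b := (List.pairwise_cons.mp h).1 b (List.mem_cons_self)
          have ht : (b :: t').Pairwise (· ≤ ·) := (List.pairwise_cons.mp h).2
          simp only [List.drop_succ_cons, List.drop_zero, List.zip_cons_cons, List.any_cons]
          by_cases hab' : a = b
          · subst hab'
            simp [List.nodup_cons]
          · have hnm : a ∉ b :: t' := by
              intro hm
              rcases List.mem_cons.mp hm with h1 | h1
              · exact hab' h1
              · have : b ≤ a := (List.pairwise_cons.mp ht).1 a h1
                exact hab' (le_antisymm hab this)
            have := ih ht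
            simp only [List.drop_succ_cons, List.drop_zero] at this
            simp [hab', this, List.nodup_cons, hnm]

-- sorting preserves Nodup
theorem nodup_sorted_iff (l : List Int) :
    (PySem.List.sorted l (fun x => x) false).Nodup ↔ l.Nodup :=
  (PySem.List.sorted_perm l (fun x => x) false).nodup_iff

-- both ports build the same list of column sums (A's form first)
theorem sums_eq (n : List (List Int)) (row0 : List Int) :
    (PySem.List.pyRange 0 (row0.length : Int) 1).foldl
      (fun l i =>
        l ++ [(PySem.List.pyRange 0 (n.length : Int) 1).foldl
          (fun c j => c + PySem.List.pyGetD (PySem.List.pyGetD n j []) i 0) 0]) []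
    = (PySem.List.pyRange 0 (row0.length : Int) 1).map
        (fun i => (n.map (fun row => PySem.List.pyGetD row i 0)).sum) := by
  rw [PySem.List.foldl_append_singleton_eq_map]
  simp only [List.nil_append]
  refine List.map_congr_left (fun i _ => ?_)
  rw [PySem.List.foldl_pyRange_zero_pyGetD' n [] (fun c row => c + PySem.List.pyGetD row i 0) 0,
      PySem.List.foldl_add]
  simp

-- one zip-add step on a list in range-map form
theorem zip_add_step (w : Nat) (g : Nat → Int) (row : List Int) (hw : w ≤ row.length) :
    (((List.range w).map g).zip row).map (fun p => p.1 + p.2)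
      = (List.range w).map (fun i => g i + row.getD i 0) := by
  apply List.ext_getElem
  · simp [Nat.min_eq_left hw]
  · intro k h1 h2
    have hk : k < w := by simpa [Nat.min_eq_left hw] using h1
    have hkr : k < row.length := lt_of_lt_of_le hk hw
    simp [List.getElem_zip, hkr, List.getD_eq_getElem?_getD]

-- B's row fold of zip-adds computes the column sums, in range-map form
theorem fold_zip_add (rows : List (List Int)) (w : Nat) (g : Nat → Int)
    (hr : ∀ row ∈ rows, w ≤ row.length) :
    rows.foldl (fun l row => (l.zip row).map (fun p => p.1 + p.2)) ((List.range w).map g)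
      = (List.range w).map (fun i => g i + (rows.map (fun row => row.getD i 0)).sum) := by
  induction rows generalizing g with
  | nil => simp
  | cons r rs ih =>
      simp only [List.foldl_cons]
      rw [zip_add_step w g r (hr r List.mem_cons_self),
          ih (fun i => g i + r.getD i 0) (fun row hm => hr row (List.mem_cons_of_mem r hm))]
      simp only [List.map_cons, List.sum_cons]
      exact List.map_congr_left (fun i _ => by ring)

-- ===== VERDICT (by name: the statement is the Claim_ definition above) =====
theorem f_spec : Claim_equal_f := by
  intro n _ hpre
  obtain ⟨hne, hw, hrows⟩ := hpre
  unfold Spec_f f f_alt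
  simp only []
  set row0 := PySem.List.pyGetD n 0 [] with hrow0
  have hhead : row0 = n.headD [] := by
    cases n with
    | nil => exact absurd rfl hne
    | cons r rs => simp [hrow0, PySem.List.pyGetD_zero_cons]
  -- A's list of column sums, as a range-map
  rw [sums_eq n row0]
  -- B's list of column sums, as the same range-map
  have hslice : PySem.List.slice row0 none none = (List.range row0.length).map
      (fun i => row0.getD i 0) := by
    rw [PySem.List.slice_none_none]
    apply List.ext_getElem
    · simp
    · intro i h1 h2
      have hi : i < row0.length := by simpa using h1
      simp [List.getElem?_eq_getElem hi]
  have hB : (n.drop 1).foldl (fun l row => (l.zip row).map (fun p => p.1 + p.2))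
      (PySem.List.slice row0 none none)
      = (List.range row0.length).map
          (fun i => row0.getD i 0 + ((n.drop 1).map (fun row => row.getD i 0)).sum) := by
    rw [hslice]
    exact fold_zip_add (n.drop 1) row0.length (fun i => row0.getD i 0)
      (fun row hm => hhead ▸ hrows row (List.mem_of_mem_drop hm))
  rw [hB]
  -- the two column-sum lists are equal
  have hlists : (PySem.List.pyRange 0 (row0.length : Int) 1).map
        (fun i => (n.map (fun row => PySem.List.pyGetD row i 0)).sum)
      = (List.range row0.length).map
          (fun i => row0.getD i 0 + ((n.drop 1).map (fun row => row.getD i 0)).sum) := by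
    rw [PySem.List.pyRange_one, List.map_map]
    simp only [Int.sub_zero, Int.toNat_natCast]
    refine List.map_congr_left (fun k hk => ?_)
    have : ∀ row : List Int, PySem.List.pyGetD row ((0 : Int) + (k : Int)) 0 = row.getD k 0 := by
      intro row
      rw [Int.zero_add, PySem.List.pyGetD_natCast]
    simp only [Function.comp_apply, this]
    cases n with
    | nil => exact absurd rfl hne
    | cons r rs =>
        have : row0 = r := by simpa using hhead
        simp [this]
  rw [hlists]
  -- the two duplicate detectors agree on any equal list
  set l := (List.range row0.length).map
      (fun i => row0.getD i 0 + ((n.drop 1).map (fun row => row.getD i 0)).sum)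
  rw [fScan_eq_not_nodup l,
      adj_eq_not_nodup _ (by
        simpa using PySem.List.sorted_pairwise l (fun x => x))]
  exact congrArg (fun b => !b) (decide_eq_decide.mpr (nodup_sorted_iff l).symm)
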